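-- pv_equiv track=rewrite | github.com/jusdesoja/MMT_Data_process | formatter.py | PreleverBloque
-- ===== SOURCE A (Python) =====
-- def PreleverBloque(contenu,start):
--     """Prélever un bloque de la contenu
--     un bloque se commence par "> No DU BLOQUE" et se termine par "[len"
--     retourne un bloque de mesure, et le numéro de derniere ligne lié au bloque de la contenu
--     """
--     Commutateur = 0
--     bloque = []
--     for lineN in range(len(contenu[start:])):
--         if "> No DU BLOQUE" in contenu[start+lineN]:
--             Commutateur = 1
--         if "[len" in contenu[start+lineN]:
--             Commutateur = 0
--             end = start + lineN  + 1
--             break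
--         if Commutateur == 1:
--             bloque.append(contenu[start+lineN])
--     return bloque, end
-- ===== SOURCE B (Python) =====
-- def PreleverBloque(contenu, start):
--     """Locate the block boundaries in the tail, then slice the block out:
--     the block ends at the first "[len" line and begins at the first
--     "> No DU BLOQUE" line before it (no marker = empty block)."""
--     tail = contenu[start:]
--     k = next(i for i, line in enumerate(tail) if "[len" in line)
--     head = tail[:k]
--     m = next((j for j, line in enumerate(head) if "> No DU BLOQUE" in line), None)
--     bloque = [] if m is None else head[m:]
--     return bloque, start + k + 1
-- ===== Notes on version B (the rewrite author's own statement) =====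
-- stated objective: simpler
-- what changed: Replaces A's flag-driven accumulating pass with a boundary-finding decomposition on the tail contenu[start:]: find the first "[len" line, then the first "> No DU BLOQUE" line before it, and return one list slice instead of element-by-element appends; Pre_ excludes only inputs where A raises (start below -len: IndexError; no "[len" line in the tail: UnboundLocalError).
import Mathlib
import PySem

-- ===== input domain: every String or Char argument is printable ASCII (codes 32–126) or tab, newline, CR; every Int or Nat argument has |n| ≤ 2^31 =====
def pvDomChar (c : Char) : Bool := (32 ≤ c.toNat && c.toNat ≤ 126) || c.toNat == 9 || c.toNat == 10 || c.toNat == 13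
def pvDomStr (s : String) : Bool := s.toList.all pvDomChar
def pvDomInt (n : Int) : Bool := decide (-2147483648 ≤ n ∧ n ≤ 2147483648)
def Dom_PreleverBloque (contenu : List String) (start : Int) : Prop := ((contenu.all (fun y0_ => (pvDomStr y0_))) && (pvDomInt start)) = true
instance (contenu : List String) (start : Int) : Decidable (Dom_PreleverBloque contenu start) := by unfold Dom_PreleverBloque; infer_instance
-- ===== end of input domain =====

-- B replaces A's flag-driven accumulating pass with find-the-boundaries-then-slice on the tail (simpler, same O(n) cost).


-- ===== PORT A =====
-- the 'for lineN in range(len(contenu[start:]))' loop with its break, Commutateur flag and bloque accumulator;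
-- 'none' in the second component = 'end' was never bound (Python raises UnboundLocalError there)
def PreleverBloqueLoop (contenu : List String) (start : Int) :
    List Int → Int → List String → List String × Option Int
  | [], _, bloque => (bloque, none)
  | lineN :: rest, comm, bloque =>
    let line := PySem.List.pyGetD contenu (start + lineN) ""
    let comm1 := if PySem.Str.isIn "> No DU BLOQUE" line then 1 else comm
    if PySem.Str.isIn "[len" line then
      (bloque, some (start + lineN + 1))
    else
      PreleverBloqueLoop contenu start rest comm1 (if comm1 = 1 then bloque ++ [line] else bloque)

def PreleverBloque (contenu : List String) (start : Int) : List String × Int :=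
  let L : Int := ((PySem.List.slice contenu (some start) none).length : Int)
  match PreleverBloqueLoop contenu start (PySem.List.pyRange 0 L 1) 0 [] with
  | (bloque, some e) => (bloque, e)
  | (bloque, none) => (bloque, 0)  -- Python raises UnboundLocalError here; excluded by Pre_

-- ===== PORT B =====
def PreleverBloque_alt (contenu : List String) (start : Int) : List String × Int :=
  let tail := PySem.List.slice contenu (some start) none
  match (PySem.List.enumerate tail).find? (fun p => PySem.Str.isIn "[len" p.2) with
  | none => ([], 0)  -- Python raises StopIteration here; excluded by Pre_
  | some (k, _) =>
    let head := PySem.List.slice tail none (some k)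
    let bloque :=
      match (PySem.List.enumerate head).find? (fun p => PySem.Str.isIn "> No DU BLOQUE" p.2) with
      | none => []
      | some (m, _) => PySem.List.slice head (some m) none
    (bloque, start + k + 1)

-- ===== PRECONDITION & SPEC =====
-- Pre_ excludes exactly the inputs on which A raises: start below -len (IndexError on the first
-- iteration) and scanned regions with no "[len" line ('end' is never bound: UnboundLocalError).
def Pre_PreleverBloque (contenu : List String) (start : Int) : Prop :=
  0 ≤ start + contenu.length ∧
  ((contenu.drop ((if 0 ≤ start then start else (contenu.length : Int) + start)).toNat).any
     (fun l => PySem.Str.isIn "[len" l)) = true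
instance (contenu : List String) (start : Int) : Decidable (Pre_PreleverBloque contenu start) := by
  unfold Pre_PreleverBloque; infer_instance

def pvWitness_PreleverBloque : List String × Int := (["> No DU BLOQUE 1", "mesure 7", "[len 2]"], 0)

def Spec_PreleverBloque (contenu : List String) (start : Int) (out : List String × Int) : Prop := out = PreleverBloque_alt contenu start
instance (contenu : List String) (start : Int) (out : List String × Int) : Decidable (Spec_PreleverBloque contenu start out) := by unfold Spec_PreleverBloque; infer_instance

-- ===== CLAIM (what is proved, stated in full; the proofs are below) =====
def Claim_equal_PreleverBloque : Prop := ∀ (contenu : List String) (start : Int), Dom_PreleverBloque contenu start → Pre_PreleverBloque contenu start → Spec_PreleverBloque contenu start (PreleverBloque contenu start)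

-- ===== LEMMAS AND PROOFS =====

-- the clamped start index and the scanned tail contenu[start:]
def pvS0 (contenu : List String) (start : Int) : Int :=
  if 0 ≤ start then start else (contenu.length : Int) + start

def pvTail (contenu : List String) (start : Int) : List String :=
  contenu.drop (pvS0 contenu start).toNat

lemma pvSliceEq (contenu : List String) (start : Int) (h0 : 0 ≤ start + contenu.length) :
    PySem.List.slice contenu (some start) none = pvTail contenu start := by
  unfold pvTail pvS0
  split_ifs with h
  · rw [PySem.List.slice_from _ h]
  · have hneg : start = -(((-start).toNat : Nat) : Int) := by omega
    rw [PySem.List.slice_some_none, hneg,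
        PySem.List.clampIdx_neg_natCast _ _ (by omega)]
    congr 1
    omega

-- A reads contenu[start + i]; on the admitted inputs that is tail[i]
lemma pvIdx (contenu : List String) (start i : Int) (h0 : 0 ≤ start + contenu.length)
    (hi0 : 0 ≤ i) (hiL : i < (pvTail contenu start).length) :
    PySem.List.pyGetD contenu (start + i) "" =
      PySem.List.pyGetD (pvTail contenu start) i "" := by
  unfold pvTail pvS0 at *
  split_ifs at * with h
  · simp only [List.length_drop] at hiL
    rw [PySem.List.pyGetD_eq_getElem _ "" (by omega) (by omega),
        PySem.List.pyGetD_eq_getElem _ "" hi0 (by simp only [List.length_drop]; omega)]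
    rw [List.getElem_drop]
    congr 1
    omega
  · simp only [List.length_drop] at hiL
    have hexp : start + i = -(((-(start + i)).toNat : Nat) : Int) := by omega
    rw [hexp, PySem.List.pyGetD_neg_natCast _ _ _ (by omega) (by omega),
        PySem.List.pyGetD_eq_getElem _ "" hi0 (by simp only [List.length_drop]; omega)]
    rw [List.getElem_drop]
    congr 1
    omega

-- what A's loop appends to bloque while scanning tail positions [k, stop) with flag comm
def pvExt (t : List String) (comm k stop : Int) : List String :=
  if comm = 1 then PySem.List.slice t (some k) (some stop)
  else
    match (PySem.List.pyRange k stop 1).find?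
        (fun j => PySem.Str.isIn "> No DU BLOQUE" (PySem.List.pyGetD t j "")) with
    | none => []
    | some m => PySem.List.slice t (some m) (some stop)

lemma pvSliceCons (t : List String) (k stop : Int) (h0 : 0 ≤ k) (_hks : k < stop)
    (hkn : k < t.length) :
    PySem.List.slice t (some k) (some stop) =
      PySem.List.pyGetD t k "" :: PySem.List.slice t (some (k + 1)) (some stop) := by
  have hkn' : k.toNat < t.length := by omega
  rw [PySem.List.slice_toNat _ h0 (by omega), PySem.List.slice_toNat _ (by omega) (by omega),
      PySem.List.pyGetD_eq_getElem _ "" h0 hkn,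
      List.drop_eq_getElem_cons hkn']
  have h1 : (stop.toNat - k.toNat) = (stop.toNat - (k + 1).toNat) + 1 := by omega
  have h2 : k.toNat + 1 = (k + 1).toNat := by omega
  rw [h1, List.take_succ_cons, h2]

lemma pvSliceNil (t : List String) (k : Int) (h0 : 0 ≤ k) :
    PySem.List.slice t (some k) (some k) = [] := by
  rw [PySem.List.slice_toNat _ h0 h0]
  simp

-- A's accumulation over [k, stop) equals one element plus the rest, for one step
lemma pvExtStep (t : List String) (comm k stop : Int) (h0 : 0 ≤ k) (hks : k < stop)
    (hkn : k < t.length) :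
    (if (if PySem.Str.isIn "> No DU BLOQUE" (PySem.List.pyGetD t k "") then 1 else comm) = 1
       then [PySem.List.pyGetD t k ""] else []) ++
      pvExt t (if PySem.Str.isIn "> No DU BLOQUE" (PySem.List.pyGetD t k "") then 1 else comm) (k + 1) stop
      = pvExt t comm k stop := by
  unfold pvExt
  by_cases hm : PySem.Str.isIn "> No DU BLOQUE" (PySem.List.pyGetD t k "") = true
  · simp only [hm, if_true]
    by_cases hc : comm = 1
    · simp only [hc, if_true, List.singleton_append]
      exact (pvSliceCons t k stop h0 hks hkn).symm
    · simp only [hc, if_false, List.singleton_append]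
      rw [PySem.List.pyRange_one_cons hks]
      simp only [List.find?_cons, hm]
      exact (pvSliceCons t k stop h0 hks hkn).symm
  · simp only [Bool.not_eq_true] at hm
    simp only [hm, Bool.false_eq_true, if_false]
    by_cases hc : comm = 1
    · simp only [hc, if_true, List.singleton_append]
      exact (pvSliceCons t k stop h0 hks hkn).symm
    · simp only [hc, if_false, List.nil_append]
      rw [PySem.List.pyRange_one_cons hks]
      simp only [List.find?_cons, hm]

lemma pvMain (contenu : List String) (start : Int) (h0 : 0 ≤ start + contenu.length) :
    ∀ (c : Nat) (k comm : Int) (bloque : List String),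
      0 ≤ k → k ≤ (pvTail contenu start).length →
      (((pvTail contenu start).length : Int) - k).toNat = c →
      PreleverBloqueLoop contenu start
          (PySem.List.pyRange k ((pvTail contenu start).length : Int) 1) comm bloque =
        match (PySem.List.pyRange k ((pvTail contenu start).length : Int) 1).find?
            (fun i => PySem.Str.isIn "[len" (PySem.List.pyGetD (pvTail contenu start) i "")) with
        | some e => (bloque ++ pvExt (pvTail contenu start) comm k e, some (start + e + 1))
        | none => (bloque ++ pvExt (pvTail contenu start) comm k ((pvTail contenu start).length : Int), none) := by
  set t := pvTail contenu start with ht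
  intro c
  induction c with
  | zero =>
    intro k comm bloque hk0 hkn hc
    have hk : k = (t.length : Int) := by omega
    subst hk
    rw [PySem.List.pyRange_one_eq_nil (by omega)]
    simp only [List.find?_nil]
    unfold PreleverBloqueLoop pvExt
    split_ifs with hc1
    · rw [pvSliceNil _ _ hk0]; simp
    · rw [PySem.List.pyRange_one_eq_nil (by omega)]; simp
  | succ c ih =>
    intro k comm bloque hk0 hkn hc
    have hklt : k < (t.length : Int) := by omega
    rw [PySem.List.pyRange_one_cons hklt]
    unfold PreleverBloqueLoop
    simp only [pvIdx contenu start k h0 hk0 (by omega), ← ht]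
    by_cases hlen : PySem.Str.isIn "[len" (PySem.List.pyGetD t k "") = true
    · simp only [List.find?_cons, hlen, if_true]
      unfold pvExt
      split_ifs with hc1
      · rw [pvSliceNil _ _ hk0]
        simp only [List.append_nil]
      · rw [PySem.List.pyRange_one_eq_nil (by omega)]
        simp only [List.find?_nil, List.append_nil]
    · simp only [List.find?_cons, hlen, Bool.false_eq_true, if_false]
      rw [ih (k + 1) _ _ (by omega) (by omega) (by omega)]
      rcases hfind : (PySem.List.pyRange (k + 1) (t.length : Int) 1).find?
          (fun i => PySem.Str.isIn "[len" (PySem.List.pyGetD t i "")) with _ | e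
      · simp only []
        congr 1
        rw [← pvExtStep t comm k (t.length : Int) hk0 hklt (by omega)]
        split_ifs <;> simp
      · have he : k + 1 ≤ e := by
          have hmem := List.mem_of_find?_eq_some hfind
          rw [PySem.List.mem_pyRange_one] at hmem
          omega
        simp only []
        congr 1
        rw [← pvExtStep t comm k e hk0 (by omega) (by omega)]
        split_ifs <;> simp

-- there is a "[len" line, so the boundary search succeeds
lemma pvFindSome (t : List String) (hany : t.any (fun l => PySem.Str.isIn "[len" l) = true) :
    ∃ e, (PySem.List.pyRange 0 (t.length : Int) 1).find?
        (fun i => PySem.Str.isIn "[len" (PySem.List.pyGetD t i "")) = some e := by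
  rw [List.any_eq_true] at hany
  obtain ⟨l, hl, hpl⟩ := hany
  rw [List.mem_iff_getElem] at hl
  obtain ⟨m, hm, hlm⟩ := hl
  have hsome : ((PySem.List.pyRange 0 (t.length : Int) 1).find?
      (fun i => PySem.Str.isIn "[len" (PySem.List.pyGetD t i ""))).isSome := by
    rw [List.find?_isSome]
    refine ⟨(m : Int), ?_, ?_⟩
    · rw [PySem.List.mem_pyRange_one]
      constructor
      · omega
      · exact_mod_cast hm
    · rw [PySem.List.pyGetD_eq_getElem _ "" (by omega) (by exact_mod_cast hm)]
      simp only [Int.toNat_natCast, hlm]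
      exact hpl
  rcases h : (PySem.List.pyRange 0 (t.length : Int) 1).find?
      (fun i => PySem.Str.isIn "[len" (PySem.List.pyGetD t i "")) with _ | e
  · rw [h] at hsome; simp at hsome
  · exact ⟨e, rfl⟩

-- B's enumerate-then-find equals a find over the index range
lemma pvEnumFind (t : List String) (p : String → Bool) :
    (PySem.List.enumerate t).find? (fun q => p q.2) =
      ((PySem.List.pyRange 0 (t.length : Int) 1).find?
          (fun j => p (PySem.List.pyGetD t j ""))).map
        (fun j => (j, PySem.List.pyGetD t j "")) := by
  have h := PySem.List.enumerate_eq_map_pyRange t ""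
  simp only [PySem.List.len] at h
  rw [h, List.find?_map]
  rfl

-- find? only cares about the predicate's values on the list
lemma pvFindCongr {α : Type} (l : List α) (p q : α → Bool)
    (h : ∀ a ∈ l, p a = q a) : l.find? p = l.find? q := by
  induction l with
  | nil => rfl
  | cons x xs ih =>
    simp only [List.find?_cons, h x (by simp)]
    split
    · rfl
    · exact ih (fun a ha => h a (by simp [ha]))

lemma pvGetTake (t : List String) (e : Nat) (j : Int)
    (h0 : 0 ≤ j) (hj : j < e) (he : e ≤ t.length) :
    PySem.List.pyGetD (t.take e) j "" = PySem.List.pyGetD t j "" := by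
  rw [PySem.List.pyGetD_eq_getElem _ "" h0
        (by simp only [List.length_take]; omega),
      PySem.List.pyGetD_eq_getElem _ "" h0 (by omega)]
  exact List.getElem_take

-- ===== VERDICT (by name: the statement is the Claim_ definition above) =====
theorem PreleverBloque_spec : Claim_equal_PreleverBloque := by
  intro contenu start _hdom hpre
  unfold Spec_PreleverBloque
  obtain ⟨h0, hany⟩ := hpre
  have hanyt : (pvTail contenu start).any (fun l => PySem.Str.isIn "[len" l) = true := hany
  obtain ⟨e, he⟩ := pvFindSome (pvTail contenu start) hanyt
  set t := pvTail contenu start with ht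
  have heb : 0 ≤ e ∧ e < (t.length : Int) := by
    have hmem := List.mem_of_find?_eq_some he
    rw [PySem.List.mem_pyRange_one] at hmem
    omega
  -- A's side
  unfold PreleverBloque
  simp only []
  rw [pvSliceEq contenu start h0, ← ht]
  have hmain := pvMain contenu start h0 ((t.length : Int)).toNat 0 0 [] le_rfl
      (by omega) (by rw [ht]; simp)
  rw [← ht] at hmain
  rw [hmain, he]
  -- B's side
  unfold PreleverBloque_alt
  simp only []
  rw [pvSliceEq contenu start h0, ← ht, pvEnumFind, he]
  simp only [Option.map_some]
  rw [PySem.List.slice_to _ heb.1]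
  have hlentake : ((t.take e.toNat).length : Int) = e := by
    simp only [List.length_take]
    omega
  rw [pvEnumFind, hlentake]
  have hfcongr : (PySem.List.pyRange 0 e 1).find?
      (fun j => PySem.Str.isIn "> No DU BLOQUE" (PySem.List.pyGetD (t.take e.toNat) j "")) =
      (PySem.List.pyRange 0 e 1).find?
        (fun j => PySem.Str.isIn "> No DU BLOQUE" (PySem.List.pyGetD t j "")) := by
    apply pvFindCongr
    intro j hj
    rw [PySem.List.mem_pyRange_one] at hj
    rw [pvGetTake t e.toNat j hj.1 (by omega) (by omega)]
  rw [hfcongr]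
  unfold pvExt
  simp only [if_neg (show ¬((0:Int) = 1) by norm_num), List.nil_append]
  rcases hm : (PySem.List.pyRange 0 e 1).find?
      (fun j => PySem.Str.isIn "> No DU BLOQUE" (PySem.List.pyGetD t j "")) with _ | m
  · simp
  · have hmb : 0 ≤ m ∧ m < e := by
      have hmem := List.mem_of_find?_eq_some hm
      rw [PySem.List.mem_pyRange_one] at hmem
      omega
    simp only [Option.map_some]
    rw [PySem.List.slice_from _ hmb.1,
        PySem.List.slice_toNat _ hmb.1 heb.1,
        List.drop_take]
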